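-- pv_equiv track=rewrite | github.com/xpn-arcos/xpn | src/stage_cloud/launcher_S3.py | calculate_nodes_and_positions
-- ===== SOURCE A (Python) =====
-- import math
--
-- def calculate_nodes_and_positions(file_size, num_nodes, part_size):
--     """Calcula la cantidad de nodos necesarios y las posiciones de inicio y fin de cada nodo."""
--     total_parts = math.ceil(file_size / part_size)
--     parts_per_node = total_parts // num_nodes
--     extra_parts = total_parts % num_nodes
--
--     node_positions = []
--     part_number = 1
--
--     for i in range(num_nodes):
--         part_number_start = part_number
--         part_number_end = part_number_start + parts_per_node - 1
--
--         if i < extra_parts: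
--             part_number_end += 1
--
--         node_positions.append((part_number_start, part_number_end))
--         part_number = part_number_end + 1
--
--     return node_positions
-- ===== SOURCE B (Python) =====
-- import math
--
-- def calculate_nodes_and_positions(file_size, num_nodes, part_size):
--     """Calcula la cantidad de nodos necesarios y las posiciones de inicio y fin de cada nodo."""
--     total_parts = math.ceil(file_size / part_size)
--     parts_per_node = total_parts // num_nodes
--     extra_parts = total_parts % num_nodes
--     return [
--         (1 + i * parts_per_node + min(i, extra_parts),
--          i * parts_per_node + min(i, extra_parts) + parts_per_node
--          + (1 if i < extra_parts else 0))
--         for i in range(num_nodes)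
--     ]
-- ===== Notes on version B (the rewrite author's own statement) =====
-- stated objective: simpler
-- what changed: The stateful loop threading part_number between iterations is replaced by a single comprehension with a closed-form per-index formula: start_i = 1 + i*parts_per_node + min(i, extra_parts).
import Mathlib
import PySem

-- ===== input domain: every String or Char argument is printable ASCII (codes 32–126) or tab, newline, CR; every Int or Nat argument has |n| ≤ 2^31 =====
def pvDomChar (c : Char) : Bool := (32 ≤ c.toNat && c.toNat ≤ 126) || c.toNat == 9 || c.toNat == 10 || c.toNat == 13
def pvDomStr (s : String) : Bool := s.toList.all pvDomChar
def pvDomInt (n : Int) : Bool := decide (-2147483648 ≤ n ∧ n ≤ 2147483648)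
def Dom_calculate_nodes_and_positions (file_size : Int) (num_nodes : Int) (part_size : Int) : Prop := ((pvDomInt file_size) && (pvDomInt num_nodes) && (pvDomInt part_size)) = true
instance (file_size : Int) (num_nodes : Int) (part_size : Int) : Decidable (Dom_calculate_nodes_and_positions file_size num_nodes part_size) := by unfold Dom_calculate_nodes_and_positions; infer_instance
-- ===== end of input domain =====

-- B replaces A's stateful loop (threading part_number) by a closed-form per-index formula; objective: simpler.
-- ===== PORT A =====
-- math.ceil(file_size / part_size) is ported as -((-file_size) // part_size): exact on the
-- domain |ints| ≤ 2^31, where the float division in Python cannot round across an integer.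
def calculate_nodes_and_positions (file_size : Int) (num_nodes : Int) (part_size : Int) : List (Int × Int) :=
  let total_parts := -(PySem.Int.floordiv (-file_size) part_size)
  let parts_per_node := PySem.Int.floordiv total_parts num_nodes
  let extra_parts := PySem.Int.mod total_parts num_nodes
  let r := (PySem.List.pyRange 0 num_nodes 1).foldl
    (fun (st : List (Int × Int) × Int) i =>
      let part_number_start := st.2
      let part_number_end := part_number_start + parts_per_node - 1
      let part_number_end := if i < extra_parts then part_number_end + 1 else part_number_end
      (st.1 ++ [(part_number_start, part_number_end)], part_number_end + 1))
    ([], 1)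
  r.1

-- ===== PORT B =====
def calculate_nodes_and_positions_alt (file_size : Int) (num_nodes : Int) (part_size : Int) : List (Int × Int) :=
  let total_parts := -(PySem.Int.floordiv (-file_size) part_size)
  let parts_per_node := PySem.Int.floordiv total_parts num_nodes
  let extra_parts := PySem.Int.mod total_parts num_nodes
  (PySem.List.pyRange 0 num_nodes 1).map (fun i =>
    (1 + i * parts_per_node + min i extra_parts,
     i * parts_per_node + min i extra_parts + parts_per_node
       + (if i < extra_parts then 1 else 0)))

-- ===== PRECONDITION & SPEC =====
-- Pre_ excludes exactly the inputs where Python A raises ZeroDivisionError.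
def Pre_calculate_nodes_and_positions (file_size : Int) (num_nodes : Int) (part_size : Int) : Prop :=
  part_size ≠ 0 ∧ num_nodes ≠ 0
instance (file_size : Int) (num_nodes : Int) (part_size : Int) : Decidable (Pre_calculate_nodes_and_positions file_size num_nodes part_size) := by unfold Pre_calculate_nodes_and_positions; infer_instance
def pvWitness_calculate_nodes_and_positions : Int × Int × Int := (10, 3, 4)
def Spec_calculate_nodes_and_positions (file_size : Int) (num_nodes : Int) (part_size : Int) (out : List (Int × Int)) : Prop := out = calculate_nodes_and_positions_alt file_size num_nodes part_size
instance (file_size : Int) (num_nodes : Int) (part_size : Int) (out : List (Int × Int)) : Decidable (Spec_calculate_nodes_and_positions file_size num_nodes part_size out) := by unfold Spec_calculate_nodes_and_positions; infer_instance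

-- ===== CLAIM (what is proved, stated in full; the proofs are below) =====
def Claim_equal_calculate_nodes_and_positions : Prop := ∀ (file_size : Int) (num_nodes : Int) (part_size : Int), Dom_calculate_nodes_and_positions file_size num_nodes part_size → Pre_calculate_nodes_and_positions file_size num_nodes part_size → Spec_calculate_nodes_and_positions file_size num_nodes part_size (calculate_nodes_and_positions file_size num_nodes part_size)

-- ===== LEMMAS AND PROOFS =====

-- Loop invariant: after processing range(0, n), the accumulator list is B's map over the same
-- range and the threaded part_number equals 1 + n*ppn + min n extra.
theorem cnp_loop (ppn extra : Int) (hextra : 0 ≤ extra) : ∀ (n : Nat),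
    (PySem.List.pyRange 0 (n : Int) 1).foldl
      (fun (st : List (Int × Int) × Int) i =>
        let s := st.2
        let e := s + ppn - 1
        let e := if i < extra then e + 1 else e
        (st.1 ++ [(s, e)], e + 1)) ([], 1)
    = ((PySem.List.pyRange 0 (n : Int) 1).map (fun i =>
        (1 + i * ppn + min i extra,
         i * ppn + min i extra + ppn + (if i < extra then 1 else 0))),
       1 + (n : Int) * ppn + min (n : Int) extra) := by
  intro n
  induction n with
  | zero => simp; omega
  | succ n ih =>
    have hcast : ((n + 1 : Nat) : Int) = (n : Int) + 1 := by push_cast; ring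
    rw [hcast, PySem.List.pyRange_one_succ_right (by exact_mod_cast Nat.zero_le n)]
    rw [List.foldl_append, List.map_append, ih]
    simp only [List.foldl_cons, List.foldl_nil, List.map_cons, List.map_nil]
    rw [Prod.mk.injEq]
    constructor
    · congr 1
      rw [List.cons.injEq, Prod.mk.injEq]
      refine ⟨⟨rfl, ?_⟩, rfl⟩
      split_ifs <;> omega
    · have hd : ((n : Int) + 1) * ppn = (n : Int) * ppn + ppn := by ring
      split_ifs <;> omega

-- ===== VERDICT (by name: the statement is the Claim_ definition above) =====
theorem calculate_nodes_and_positions_spec : Claim_equal_calculate_nodes_and_positions := by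
  intro file_size num_nodes part_size _ hpre
  unfold Spec_calculate_nodes_and_positions
  unfold calculate_nodes_and_positions calculate_nodes_and_positions_alt
  by_cases hn : num_nodes ≤ 0
  · rw [PySem.List.pyRange_one_eq_nil (by omega)]; rfl
  · have hnpos : 0 < num_nodes := by omega
    have hextra : 0 ≤ PySem.Int.mod (-(PySem.Int.floordiv (-file_size) part_size)) num_nodes :=
      PySem.Int.mod_nonneg _ hnpos
    have hnn : ((num_nodes.toNat : Nat) : Int) = num_nodes := by omega
    have key := cnp_loop (PySem.Int.floordiv (-(PySem.Int.floordiv (-file_size) part_size)) num_nodes)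
      (PySem.Int.mod (-(PySem.Int.floordiv (-file_size) part_size)) num_nodes) hextra num_nodes.toNat
    rw [hnn] at key
    exact congrArg Prod.fst key
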